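-- pv_equiv track=rewrite | github.com/bogdandanciu/KinetiX | generator/utils.py | prod_of_exp_rcp
-- ===== SOURCE A (Python) =====
-- from itertools import tee, filterfalse, repeat
--
-- def flatten_list(t):
--     """
--     Flatten a nested list into a single list.
--     """
--     return [item for sublist in t for item in sublist]
--
-- def partition(pred, iterable):
--     """
--     Partition the elements of an iterable into two lists based on the given
--     predicate.
--     """
--
--     t1, t2 = tee(iterable)
--     return list(filterfalse(pred, t1)), list(filter(pred, t2))
--
-- def prod_of_exp_rcp(c, v, rcp):
--     """
--     Calculate the reciprocal for the product of exponentiations involving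
--     variables.
--     """
--
--     for _c in c:
--         assert (_c == int(_c))
--     c = [int(c) for c in c]
--     (div, num) = partition(lambda c: c[1] > 0, [(i, c) for i, c in enumerate(c) if c != 0])
--     num = '*'.join(flatten_list([repeat(f'{v}{i}', max(0, c)) for i, c in num]))
--     div = '*'.join(flatten_list([repeat(f'{rcp}{i}', max(0, -c)) for i, c in div]))
--     if (num == '') and (div == ''):
--         return '1.'
--     elif div == '':
--         return num
--     elif num == '':
--         return div
--     else:
--         return f'{num}*{div}'
-- ===== SOURCE B (Python) =====
-- def prod_of_exp_rcp(c, v, rcp):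
--     """
--     Calculate the reciprocal for the product of exponentiations involving
--     variables.
--     """
--     for _c in c:
--         assert (_c == int(_c))
--     num = div = ''
--     for i, e in reversed(list(enumerate(c))):
--         e = int(e)
--         if e > 0:
--             num = (f'{v}{i}' + '*') * e + num
--         elif e < 0:
--             div = (f'{rcp}{i}' + '*') * (-e) + div
--     s = num + div
--     return s[:-1] if s else '1.'
-- ===== Notes on version B (the rewrite author's own statement) =====
-- stated objective: alternative
-- what changed: Instead of partitioning the enumerated list and joining lists of repeated tokens with '*', B walks the list backwards once, prepending each factor with a trailing '*' directly onto two result strings, then trims the final trailing '*' with a slice ('1.' when empty) - no partition, no token lists, no join, and A's four-way emptiness branching disappears; it trades the join for repeated string prepending, which is slower on large outputs.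
import Mathlib
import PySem

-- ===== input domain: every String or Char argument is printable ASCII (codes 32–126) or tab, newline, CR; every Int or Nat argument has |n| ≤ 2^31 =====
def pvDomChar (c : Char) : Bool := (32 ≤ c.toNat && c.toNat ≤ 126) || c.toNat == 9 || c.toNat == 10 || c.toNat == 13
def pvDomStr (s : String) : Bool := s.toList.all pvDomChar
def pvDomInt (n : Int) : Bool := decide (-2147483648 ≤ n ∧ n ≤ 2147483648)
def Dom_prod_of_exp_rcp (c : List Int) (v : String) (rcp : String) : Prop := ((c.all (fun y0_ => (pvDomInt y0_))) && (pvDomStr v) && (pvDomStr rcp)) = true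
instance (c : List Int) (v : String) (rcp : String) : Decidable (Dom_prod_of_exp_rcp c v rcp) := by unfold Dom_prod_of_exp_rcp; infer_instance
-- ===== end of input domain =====

-- B drops A's partition/repeat/flatten/join pipeline: it walks the list backwards once, prepending
-- each factor with a trailing '*' directly into two strings, and finally trims the last '*' with a
-- slice ('1.' when empty) — an alternative decomposition, no token lists and no join.

-- ===== PORT A =====
-- the assert loop always succeeds on Int and `[int(x) for x in c]` is the identity, so both are omitted
def prod_of_exp_rcp (c : List Int) (v : String) (rcp : String) : String :=
  let pairs := (PySem.List.enumerate c).filter (fun p => p.2 != 0)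
  let div := pairs.filter (fun p => !(decide (p.2 > 0)))
  let num := pairs.filter (fun p => decide (p.2 > 0))
  let numS := PySem.Str.join "*" ((num.map (fun p => List.replicate (max 0 p.2).toNat (v ++ PySem.Int.toStr p.1))).flatten)
  let divS := PySem.Str.join "*" ((div.map (fun p => List.replicate (max 0 (-p.2)).toNat (rcp ++ PySem.Int.toStr p.1))).flatten)
  if numS = "" ∧ divS = "" then "1."
  else if divS = "" then numS
  else if numS = "" then divS
  else numS ++ "*" ++ divS

-- ===== PORT B =====
-- loop body of B: prepend (f'{v}{i}' + '*') * e to num on e > 0, (f'{rcp}{i}' + '*') * (-e) to div on e < 0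
def pvStepB (v rcp : String) (acc : String × String) (p : Int × Int) : String × String :=
  if p.2 > 0 then
    (String.ofList (PySem.List.pyRepeat (v ++ PySem.Int.toStr p.1 ++ "*").toList p.2) ++ acc.1, acc.2)
  else if p.2 < 0 then
    (acc.1, String.ofList (PySem.List.pyRepeat (rcp ++ PySem.Int.toStr p.1 ++ "*").toList (-p.2)) ++ acc.2)
  else acc

def prod_of_exp_rcp_alt (c : List Int) (v : String) (rcp : String) : String :=
  let r := ((PySem.List.enumerate c).reverse).foldl (pvStepB v rcp) ("", "")
  let s := r.1 ++ r.2
  if s = "" then "1." else PySem.Str.slice s none (some (-1))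

-- ===== PRECONDITION & SPEC =====
def Spec_prod_of_exp_rcp (c : List Int) (v : String) (rcp : String) (out : String) : Prop := out = prod_of_exp_rcp_alt c v rcp
instance (c : List Int) (v : String) (rcp : String) (out : String) : Decidable (Spec_prod_of_exp_rcp c v rcp out) := by unfold Spec_prod_of_exp_rcp; infer_instance

-- ===== CLAIM (what is proved, stated in full; the proofs are below) =====
def Claim_equal_prod_of_exp_rcp : Prop := ∀ (c : List Int) (v : String) (rcp : String), Dom_prod_of_exp_rcp c v rcp → Spec_prod_of_exp_rcp c v rcp (prod_of_exp_rcp c v rcp)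

-- ===== LEMMAS AND PROOFS =====

-- the forward-order lists of factor strings (A produces them after partition/filter fusion)
def pvNum (v : String) (l : List (Int × Int)) : List String :=
  ((l.filter (fun p => decide (p.2 > 0))).map (fun p => List.replicate p.2.toNat (v ++ PySem.Int.toStr p.1))).flatten

def pvDiv (rcp : String) (l : List (Int × Int)) : List String :=
  ((l.filter (fun p => decide (p.2 < 0))).map (fun p => List.replicate (-p.2).toNat (rcp ++ PySem.Int.toStr p.1))).flatten

-- the characters B's accumulator holds: each factor followed by a trailing '*'
def pvCat (parts : List String) : List Char :=
  (parts.map (fun p => p.toList ++ ['*'])).flatten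

theorem pvCat_append (a b : List String) : pvCat (a ++ b) = pvCat a ++ pvCat b := by
  simp [pvCat]

theorem pvFoldB (v rcp : String) : ∀ l : List (Int × Int),
    ((l.foldr (fun p acc => pvStepB v rcp acc p) ("", "")).1.toList = pvCat (pvNum v l)) ∧
    ((l.foldr (fun p acc => pvStepB v rcp acc p) ("", "")).2.toList = pvCat (pvDiv rcp l)) := by
  intro l
  induction l with
  | nil => simp [pvNum, pvDiv, pvCat]
  | cons p t ih =>
    obtain ⟨h1, h2⟩ := ih
    have hstep : ((p :: t).foldr (fun p acc => pvStepB v rcp acc p) ("", ""))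
        = pvStepB v rcp (t.foldr (fun p acc => pvStepB v rcp acc p) ("", "")) p := rfl
    rw [hstep]
    set acc := t.foldr (fun p acc => pvStepB v rcp acc p) ("", "") with hacc
    rcases lt_trichotomy p.2 0 with h | h | h
    · rw [pvStepB, if_neg (by omega : ¬ p.2 > 0), if_pos h]
      refine ⟨by simpa [pvNum, List.filter_cons, show ¬ (0 < p.2) from by omega] using h1, ?_⟩
      have hrep : pvCat (List.replicate (-p.2).toNat (rcp ++ PySem.Int.toStr p.1))
          = (List.replicate (-p.2).toNat ((rcp ++ PySem.Int.toStr p.1 ++ "*").toList)).flatten := by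
        simp [pvCat, List.map_replicate]
      simp [pvDiv, h, pvCat_append, hrep, h2, PySem.List.pyRepeat]
    · rw [pvStepB, if_neg (by omega : ¬ p.2 > 0), if_neg (by omega : ¬ p.2 < 0)]
      refine ⟨?_, ?_⟩
      · simpa [pvNum, List.filter_cons, show ¬ (0 < p.2) from by omega] using h1
      · simpa [pvDiv, List.filter_cons, show ¬ (p.2 < 0) from by omega] using h2
    · rw [pvStepB, if_pos h]
      refine ⟨?_, by simpa [pvDiv, List.filter_cons, show ¬ (p.2 < 0) from by omega] using h2⟩
      have hrep : pvCat (List.replicate p.2.toNat (v ++ PySem.Int.toStr p.1))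
          = (List.replicate p.2.toNat ((v ++ PySem.Int.toStr p.1 ++ "*").toList)).flatten := by
        simp [pvCat, List.map_replicate]
      simp [pvNum, h, pvCat_append, hrep, h1, PySem.List.pyRepeat]

theorem pvCat_eq_join_concat (parts : List String) (h : parts ≠ []) :
    pvCat parts = PySem.Chars.join ['*'] (parts.map String.toList) ++ ['*'] := by
  induction parts with
  | nil => exact absurd rfl h
  | cons p t ih =>
    cases t with
    | nil => simp [pvCat, PySem.Chars.join_singleton]
    | cons q r =>
      have : pvCat (p :: q :: r) = (p.toList ++ ['*']) ++ pvCat (q :: r) := by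
        simp [pvCat]
      rw [this, ih (by simp)]
      simp only [List.map_cons]
      rw [PySem.Chars.join_cons_cons]
      simp

theorem pvA_num (v : String) (l : List (Int × Int)) :
    (((l.filter (fun p => p.2 != 0)).filter (fun p => decide (p.2 > 0))).map
      (fun p => List.replicate (max 0 p.2).toNat (v ++ PySem.Int.toStr p.1))).flatten = pvNum v l := by
  unfold pvNum
  rw [List.filter_filter]
  have hf : (l.filter (fun a => decide (a.2 > 0) && (a.2 != 0)))
      = l.filter (fun a : Int × Int => decide (a.2 > 0)) := by
    apply List.filter_congr
    intro x _
    by_cases hx2 : x.2 > 0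
    · simp [hx2]; omega
    · simp [hx2]
  rw [hf]
  congr 1
  apply List.map_congr_left
  intro x hx
  have hpos : 0 < x.2 := by simpa using (List.mem_filter.mp hx).2
  have hm : max 0 x.2 = x.2 := by omega
  rw [hm]

theorem pvA_div (rcp : String) (l : List (Int × Int)) :
    (((l.filter (fun p => p.2 != 0)).filter (fun p => !(decide (p.2 > 0)))).map
      (fun p => List.replicate (max 0 (-p.2)).toNat (rcp ++ PySem.Int.toStr p.1))).flatten = pvDiv rcp l := by
  unfold pvDiv
  rw [List.filter_filter]
  have hf : (l.filter (fun a => (!decide (a.2 > 0)) && (a.2 != 0)))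
      = l.filter (fun a : Int × Int => decide (a.2 < 0)) := by
    apply List.filter_congr
    intro x _
    rcases lt_trichotomy x.2 0 with h | h | h
    · simp [h, show ¬ (x.2 > 0) by omega, show x.2 ≠ 0 by omega]
    · simp [h]
    · simp [h, show ¬ (x.2 < 0) by omega]
  rw [hf]
  congr 1
  apply List.map_congr_left
  intro x hx
  have hneg : x.2 < 0 := by simpa using (List.mem_filter.mp hx).2
  have hm : max 0 (-x.2) = -x.2 := by omega
  rw [hm]

theorem pvToDigitsCore_len : ∀ (f n : Nat) (ds : List Char),
    ds.length ≤ (Nat.toDigitsCore 10 f n ds).length := by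
  intro f
  induction f with
  | zero => intro n ds; simp [Nat.toDigitsCore]
  | succ f ih =>
    intro n ds
    simp only [Nat.toDigitsCore]
    split
    · simp
    · exact le_trans (by simp) (ih _ _)

theorem pvToDigits_ne_nil (n : Nat) : Nat.toDigits 10 n ≠ [] := by
  intro h
  have := pvToDigitsCore_len n (n / 10) [Nat.digitChar (n % 10)]
  unfold Nat.toDigits at h
  simp only [Nat.toDigitsCore] at h
  split at h
  · simp at h
  · rw [h] at this; simp at this

theorem pvToChars_ne_nil (n : Int) : PySem.Int.toChars n ≠ [] := by
  unfold PySem.Int.toChars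
  split
  · simp
  · exact pvToDigits_ne_nil _

theorem pvPart_ne (v : String) (i : Int) : (v ++ PySem.Int.toStr i).toList ≠ [] := by
  simp [PySem.Int.toStr, pvToChars_ne_nil]

theorem pvJoin_ne_nil (sep : List Char) : ∀ parts : List (List Char), parts ≠ [] →
    (∀ p ∈ parts, p ≠ []) → PySem.Chars.join sep parts ≠ [] := by
  intro parts
  match parts with
  | [] => intro h; exact absurd rfl h
  | [p] =>
    intro _ hp
    rw [PySem.Chars.join_singleton]
    exact hp p (by simp)
  | p :: q :: rest =>
    intro _ hp
    rw [PySem.Chars.join_cons_cons]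
    have : p ≠ [] := hp p (by simp)
    simp [this]

theorem pvJoin_append (sep : List Char) : ∀ (xs ys : List (List Char)), xs ≠ [] → ys ≠ [] →
    PySem.Chars.join sep (xs ++ ys) = PySem.Chars.join sep xs ++ sep ++ PySem.Chars.join sep ys := by
  intro xs
  induction xs with
  | nil => intro ys h; exact absurd rfl h
  | cons x xs ih =>
    intro ys _ hys
    cases xs with
    | nil =>
      cases ys with
      | nil => exact absurd rfl hys
      | cons y t =>
        simp only [List.cons_append, List.nil_append]
        rw [PySem.Chars.join_cons_cons, PySem.Chars.join_singleton]
    | cons x' xs' =>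
      have : (x :: x' :: xs') ++ ys = x :: x' :: (xs' ++ ys) := rfl
      rw [this, PySem.Chars.join_cons_cons,
        show (x' :: (xs' ++ ys)) = (x' :: xs') ++ ys from rfl,
        ih ys (by simp) hys, PySem.Chars.join_cons_cons]
      simp [List.append_assoc]

theorem pvJoinStr_eq_empty_iff (parts : List String) (h : ∀ p ∈ parts, p.toList ≠ []) :
    (PySem.Str.join "*" parts = "") ↔ parts = [] := by
  constructor
  · intro he
    by_contra hne
    have h1 : (PySem.Str.join "*" parts).toList = [] := by rw [he]; rfl
    rw [PySem.Str.toList_join] at h1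
    exact pvJoin_ne_nil "*".toList (parts.map String.toList) (by simpa using hne)
      (by intro p hp; rcases List.mem_map.mp hp with ⟨s, hs, rfl⟩; exact h s hs) h1
  · rintro rfl
    apply String.toList_inj.mp
    rw [PySem.Str.toList_join]
    simp [PySem.Chars.join_nil]

theorem pvMem_pvNum_ne (v : String) (l : List (Int × Int)) :
    ∀ s ∈ pvNum v l, s.toList ≠ [] := by
  intro s hs
  rcases List.mem_flatten.mp hs with ⟨L, hL, hsL⟩
  rcases List.mem_map.mp hL with ⟨p, _, rfl⟩
  rw [List.eq_of_mem_replicate hsL]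
  exact pvPart_ne v p.1

theorem pvMem_pvDiv_ne (rcp : String) (l : List (Int × Int)) :
    ∀ s ∈ pvDiv rcp l, s.toList ≠ [] := by
  intro s hs
  rcases List.mem_flatten.mp hs with ⟨L, hL, hsL⟩
  rcases List.mem_map.mp hL with ⟨p, _, rfl⟩
  rw [List.eq_of_mem_replicate hsL]
  exact pvPart_ne rcp p.1

-- ===== VERDICT (by name: the statement is the Claim_ definition above) =====
theorem prod_of_exp_rcp_spec : Claim_equal_prod_of_exp_rcp := by
  intro c v rcp _
  unfold Spec_prod_of_exp_rcp prod_of_exp_rcp prod_of_exp_rcp_alt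
  simp only [List.foldl_reverse, pvA_num, pvA_div]
  set l := PySem.List.enumerate c with hl
  set NL := pvNum v l with hNL
  set DL := pvDiv rcp l with hDL
  have hF := pvFoldB v rcp l
  have hs : ((l.foldr (fun p acc => pvStepB v rcp acc p) ("", "")).1 ++
      (l.foldr (fun p acc => pvStepB v rcp acc p) ("", "")).2).toList = pvCat (NL ++ DL) := by
    rw [String.toList_append, hF.1, hF.2, pvCat_append]
  have hNiff := pvJoinStr_eq_empty_iff NL (pvMem_pvNum_ne v _)
  have hDiff := pvJoinStr_eq_empty_iff DL (pvMem_pvDiv_ne rcp _)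
  by_cases hN : NL = [] <;> by_cases hD : DL = []
  · -- both empty: '1.' on both sides
    have h1 : PySem.Str.join "*" NL = "" := hNiff.mpr hN
    have h2 : PySem.Str.join "*" DL = "" := hDiff.mpr hD
    have hse : ((l.foldr (fun p acc => pvStepB v rcp acc p) ("", "")).1 ++
        (l.foldr (fun p acc => pvStepB v rcp acc p) ("", "")).2) = "" := by
      apply String.toList_inj.mp
      rw [hs, hN, hD]
      simp [pvCat]
    rw [if_pos ⟨h1, h2⟩, if_pos hse]
  · -- only div
    have h1 : PySem.Str.join "*" NL = "" := hNiff.mpr hN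
    have h2 : ¬ (PySem.Str.join "*" DL = "") := fun he => hD (hDiff.mp he)
    have hcat : pvCat (NL ++ DL) = PySem.Chars.join ['*'] (DL.map String.toList) ++ ['*'] := by
      rw [hN, List.nil_append, pvCat_eq_join_concat DL hD]
    have hne : ¬ ((l.foldr (fun p acc => pvStepB v rcp acc p) ("", "")).1 ++
        (l.foldr (fun p acc => pvStepB v rcp acc p) ("", "")).2) = "" := by
      intro he
      have : pvCat (NL ++ DL) = [] := by rw [← hs, he]; rfl
      rw [hcat] at this; simp at this
    rw [if_neg (fun hcon => h2 hcon.2), if_neg h2, if_pos h1, if_neg hne]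
    apply String.toList_inj.mp
    rw [PySem.Str.slice_to_neg_one, hs, hcat, List.dropLast_concat, PySem.Str.toList_join]
    rfl
  · -- only num
    have h1 : ¬ (PySem.Str.join "*" NL = "") := fun he => hN (hNiff.mp he)
    have h2 : PySem.Str.join "*" DL = "" := hDiff.mpr hD
    have hcat : pvCat (NL ++ DL) = PySem.Chars.join ['*'] (NL.map String.toList) ++ ['*'] := by
      rw [hD, List.append_nil, pvCat_eq_join_concat NL hN]
    have hne : ¬ ((l.foldr (fun p acc => pvStepB v rcp acc p) ("", "")).1 ++
        (l.foldr (fun p acc => pvStepB v rcp acc p) ("", "")).2) = "" := by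
      intro he
      have : pvCat (NL ++ DL) = [] := by rw [← hs, he]; rfl
      rw [hcat] at this; simp at this
    rw [if_neg (fun hcon => h1 hcon.1), if_pos h2, if_neg hne]
    apply String.toList_inj.mp
    rw [PySem.Str.slice_to_neg_one, hs, hcat, List.dropLast_concat, PySem.Str.toList_join]
    rfl
  · -- both nonempty
    have h1 : ¬ (PySem.Str.join "*" NL = "") := fun he => hN (hNiff.mp he)
    have h2 : ¬ (PySem.Str.join "*" DL = "") := fun he => hD (hDiff.mp he)
    have hcat : pvCat (NL ++ DL)
        = PySem.Chars.join ['*'] ((NL ++ DL).map String.toList) ++ ['*'] :=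
      pvCat_eq_join_concat (NL ++ DL) (by simp [hN])
    have hne : ¬ ((l.foldr (fun p acc => pvStepB v rcp acc p) ("", "")).1 ++
        (l.foldr (fun p acc => pvStepB v rcp acc p) ("", "")).2) = "" := by
      intro he
      have : pvCat (NL ++ DL) = [] := by rw [← hs, he]; rfl
      rw [hcat] at this; simp at this
    rw [if_neg (fun hcon => h1 hcon.1), if_neg h2, if_neg h1, if_neg hne]
    apply String.toList_inj.mp
    rw [PySem.Str.slice_to_neg_one, hs, hcat, List.dropLast_concat, String.toList_append,
      String.toList_append, PySem.Str.toList_join, PySem.Str.toList_join, List.map_append]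
    simp only [show "*".toList = ['*'] from rfl]
    rw [pvJoin_append ['*'] _ _ (by simpa using hN) (by simpa using hD)]
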